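-- pv_equiv track=rewrite | github.com/JH-TT/Coding_Practice | Programmers/Implementation_P/388354.py | solution
-- ===== SOURCE A (Python) =====
-- from collections import defaultdict, deque
--
-- def solution(nodes, edges):
--     answer = [0, 0]
--     arr = defaultdict(list)
--     check = defaultdict(lambda: False)
--
--     for node in nodes:
--         if arr[node]: # defaultdict는 접근하기만 해도 디폴트가 생성된다.
--             pass
--
--     for a, b in edges:
--         arr[a].append(b)
--         arr[b].append(a)
--
--     for node in arr:
--         if check[node]:
--             continue
--         check[node] = True
--         q = deque()
--         q.append(node)
--         cnt = [0, 0] # 왼쪽이 다른, 오른쪽이 같은경우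
--         cnt[len(arr[node]) % 2 == node % 2] += 1
--         while q:
--             now = q.popleft()
--
--             for nxt in arr[now]:
--                 if check[nxt]:
--                     continue
--                 check[nxt] = True
--                 cnt[len(arr[nxt]) % 2 == nxt % 2] += 1
--                 q.append(nxt)
--
--         # 단 하나인 경우 무조건 만족
--         if sum(cnt) == 1:
--             answer[cnt[0] == 1] += 1
--         else:
--             # 역홀짝
--             if cnt[0] == 1:
--                 answer[1] += 1
--             if cnt[1] == 1:
--                 answer[0] += 1
--
--     return answer
-- ===== SOURCE B (Python) =====
-- def solution(nodes, edges):
--     # degree in one pass over edges; components by edge-scan fixpoint (no adjacency lists, no queue)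
--     deg = {}
--     order = []
--     seen = set()
--     for node in nodes:
--         if node not in seen:
--             seen.add(node)
--             order.append(node)
--     for a, b in edges:
--         deg[a] = deg.get(a, 0) + 1
--         deg[b] = deg.get(b, 0) + 1
--         for v in (a, b):
--             if v not in seen:
--                 seen.add(v)
--                 order.append(v)
--     answer = [0, 0]
--     done = set()
--     for rep in order:
--         if rep in done:
--             continue
--         comp = {rep}
--         while True:
--             new = set(comp)
--             for a, b in edges:
--                 if a in comp or b in comp:
--                     new.add(a)
--                     new.add(b)
--             if new == comp:
--                 break
--             comp = new
--         done |= comp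
--         c = [0, 0]
--         for x in comp:
--             c[deg.get(x, 0) % 2 == x % 2] += 1
--         if c[0] + c[1] == 1:
--             answer[c[0] == 1] += 1
--         else:
--             if c[0] == 1:
--                 answer[1] += 1
--             if c[1] == 1:
--                 answer[0] += 1
--     return answer
-- ===== Notes on version B (the rewrite author's own statement) =====
-- stated objective: alternative
-- what changed: B drops A's adjacency-list/defaultdict + BFS-queue machinery: it builds a degree dict in one pass over the edges and finds each connected component by an edge-scan fixpoint (repeatedly adding both endpoints of any edge touching the component until it stops growing), then applies the same parity classification.
import Mathlib
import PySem

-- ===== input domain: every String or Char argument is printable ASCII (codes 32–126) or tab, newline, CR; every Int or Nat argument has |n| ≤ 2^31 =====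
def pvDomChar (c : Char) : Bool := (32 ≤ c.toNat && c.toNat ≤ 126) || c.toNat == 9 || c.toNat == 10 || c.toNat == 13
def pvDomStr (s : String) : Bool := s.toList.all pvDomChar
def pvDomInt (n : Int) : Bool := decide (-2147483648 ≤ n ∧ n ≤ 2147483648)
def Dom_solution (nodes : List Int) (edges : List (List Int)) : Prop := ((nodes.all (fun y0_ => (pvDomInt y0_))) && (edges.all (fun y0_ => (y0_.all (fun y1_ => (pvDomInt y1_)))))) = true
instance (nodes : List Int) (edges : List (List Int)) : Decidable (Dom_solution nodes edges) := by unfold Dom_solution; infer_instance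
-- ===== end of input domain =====

-- B replaces A's defaultdict-adjacency + BFS queue by a one-pass degree dict and an
-- edge-scan fixpoint per component (alternative algorithm; not faster).


-- ===== PORT A =====
-- the two-element Python lists cnt / answer are ported as pairs (index 0, index 1);
-- `lst[b] += 1` with a bool index b is pvBump (shared by both ports: the Python text is identical)
def pvBump (c : Int × Int) (b : Bool) : Int × Int :=
  if b then (c.1, c.2 + 1) else (c.1 + 1, c.2)

-- the final classification block, identical Python text in A and in B
def pvClassify (answer : Int × Int) (cnt : Int × Int) : Int × Int :=
  if cnt.1 + cnt.2 = 1 then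
    (if cnt.1 = 1 then (answer.1, answer.2 + 1) else (answer.1 + 1, answer.2))
  else
    let answer := if cnt.1 = 1 then (answer.1, answer.2 + 1) else answer
    if cnt.2 = 1 then (answer.1 + 1, answer.2) else answer

-- len(arr[x]) % 2 == x % 2
def pvParA (arr : PySem.Dict Int (List Int)) (x : Int) : Bool :=
  decide (PySem.Int.mod ((arr.getD x []).length : Int) 2 = PySem.Int.mod x 2)

-- A's arr: defaultdict(list); the read-only loop over nodes creates keys with default [],
-- then each edge [a,b] appends b to arr[a] and a to arr[b]
def pvArr (nodes : List Int) (edges : List (List Int)) : PySem.Dict Int (List Int) :=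
  let arr : PySem.Dict Int (List Int) :=
    nodes.foldl (fun arr node => if arr.contains node then arr else arr.insert node []) PySem.Dict.empty
  edges.foldl (fun arr e =>
    match e with
    | [a, b] =>
        let arr := arr.insert a (arr.getD a [] ++ [b])
        arr.insert b (arr.getD b [] ++ [a])
    | _ => arr)  -- Python raises ValueError here; excluded by Pre_solution
    arr

-- A's `while q:` BFS loop; fuel only makes the recursion structural (proved sufficient below)
def pvBfs (arr : PySem.Dict Int (List Int)) :
    Nat → PySem.Dict Int Bool → Int × Int → List Int → PySem.Dict Int Bool × (Int × Int)
  | 0, check, cnt, _ => (check, cnt)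
  | _ + 1, check, cnt, [] => (check, cnt)
  | fuel + 1, check, cnt, now :: rest =>
      let s := (arr.getD now []).foldl
        (fun (s : PySem.Dict Int Bool × (Int × Int) × List Int) nxt =>
          if s.1.getD nxt false then s
          else (s.1.insert nxt true, pvBump s.2.1 (pvParA arr nxt), s.2.2 ++ [nxt]))
        (check, cnt, [])
      pvBfs arr fuel s.1 s.2.1 (rest ++ s.2.2)

-- one iteration of A's outer `for node in arr:` loop (check = defaultdict(bool))
def pvStepA (arr : PySem.Dict Int (List Int))
    (st : PySem.Dict Int Bool × (Int × Int)) (node : Int) : PySem.Dict Int Bool × (Int × Int) :=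
  if st.1.getD node false then st
  else
    let check := st.1.insert node true
    let cnt := pvBump (0, 0) (pvParA arr node)
    let r := pvBfs arr (2 * arr.keys.length + 2) check cnt [node]
    (r.1, pvClassify st.2 r.2)

def solution (nodes : List Int) (edges : List (List Int)) : List Int :=
  let arr := pvArr nodes edges
  let st := arr.keys.foldl (pvStepA arr) (PySem.Dict.empty, (0, 0))
  [st.2.1, st.2.2]

-- ===== PORT B =====
-- deg.get(x, 0) % 2 == x % 2
def pvParB (deg : PySem.Dict Int Int) (x : Int) : Bool :=
  decide (PySem.Int.mod (deg.getD x 0) 2 = PySem.Int.mod x 2)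

-- B's first two loops: deg dict, plus `order`/`seen` (first-occurrence list of all nodes)
def pvDegOrder (nodes : List Int) (edges : List (List Int)) :
    PySem.Dict Int Int × PySem.Set Int × List Int :=
  let s0 : PySem.Set Int × List Int :=
    nodes.foldl (fun s node =>
      if s.1.contains node then s else (PySem.Set.add s.1 node, s.2 ++ [node])) (PySem.Set.empty, [])
  edges.foldl (fun s e =>
    match e with
    | [a, b] =>
        let deg := s.1.insert a (s.1.getD a 0 + 1)
        let deg := deg.insert b (deg.getD b 0 + 1)
        let t := if s.2.1.contains a then s.2 else (PySem.Set.add s.2.1 a, s.2.2 ++ [a])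
        let t := if t.1.contains b then t else (PySem.Set.add t.1 b, t.2 ++ [b])
        (deg, t)
    | _ => s)  -- Python raises ValueError here; excluded by Pre_solution
    (PySem.Dict.empty, s0.1, s0.2)

-- one scan of the edge list: add both endpoints of any edge touching comp
def pvSatStep (edges : List (List Int)) (comp : PySem.Set Int) : PySem.Set Int :=
  edges.foldl (fun new e =>
    match e with
    | [a, b] =>
        if comp.contains a || comp.contains b then PySem.Set.add (PySem.Set.add new a) b else new
    | _ => new) comp

-- B's `while True:` fixpoint loop; fuel only makes the recursion structural (proved sufficient below)
def pvSat (edges : List (List Int)) : Nat → PySem.Set Int → PySem.Set Int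
  | 0, comp => comp
  | fuel + 1, comp =>
      let new := pvSatStep edges comp
      if PySem.Set.equal new comp then comp else pvSat edges fuel new

-- one iteration of B's `for rep in order:` loop
def pvStepB (edges : List (List Int)) (deg : PySem.Dict Int Int) (n : Nat)
    (st : PySem.Set Int × (Int × Int)) (rep : Int) : PySem.Set Int × (Int × Int) :=
  if st.1.contains rep then st
  else
    let comp := pvSat edges (n + 1) (PySem.Set.add PySem.Set.empty rep)
    let done := PySem.Set.union st.1 comp
    let c := comp.foldl (fun c x => pvBump c (pvParB deg x)) (0, 0)
    (done, pvClassify st.2 c)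

def solution_alt (nodes : List Int) (edges : List (List Int)) : List Int :=
  let d := pvDegOrder nodes edges
  let st := d.2.2.foldl (pvStepB edges d.1 d.2.2.length) (PySem.Set.empty, (0, 0))
  [st.2.1, st.2.2]

-- ===== PRECONDITION & SPEC =====
-- Pre_ excludes exactly the inputs where `for a, b in edges` raises (an edge whose length is not 2):
-- both A and B raise ValueError there.
def Pre_solution (nodes : List Int) (edges : List (List Int)) : Prop :=
  ∀ e ∈ edges, e.length = 2
instance (nodes : List Int) (edges : List (List Int)) : Decidable (Pre_solution nodes edges) := by
  unfold Pre_solution; infer_instance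

def pvWitness_solution : List Int × List (List Int) := ([1, 2, 5], [[1, 2], [2, 3]])

def Spec_solution (nodes : List Int) (edges : List (List Int)) (out : List Int) : Prop := out = solution_alt nodes edges
instance (nodes : List Int) (edges : List (List Int)) (out : List Int) : Decidable (Spec_solution nodes edges out) := by unfold Spec_solution; infer_instance

-- ===== CLAIM (what is proved, stated in full; the proofs are below) =====
def Claim_equal_solution : Prop := ∀ (nodes : List Int) (edges : List (List Int)), Dom_solution nodes edges → Pre_solution nodes edges → Spec_solution nodes edges (solution nodes edges)

-- ===== LEMMAS AND PROOFS =====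

-- ---------- well-formed edge pairs; both ports skip malformed edges ----------
def pvPairs (edges : List (List Int)) : List (Int × Int) :=
  edges.filterMap (fun e => match e with | [a, b] => some (a, b) | _ => none)

-- adjacency generated by a pair list, and its reflexive-transitive closure
def pvAdjP (ps : List (Int × Int)) (x y : Int) : Prop :=
  ∃ p ∈ ps, p = (x, y) ∨ p = (y, x)

def pvRP (ps : List (Int × Int)) : Int → Int → Prop :=
  Relation.ReflTransGen (pvAdjP ps)

theorem pvAdjP_symm {ps : List (Int × Int)} {x y : Int} (h : pvAdjP ps x y) : pvAdjP ps y x := by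
  obtain ⟨p, hp, h⟩ := h; rcases h with h | h <;> exact ⟨p, hp, by simp [h]⟩

theorem pvFoldl_pairs {σ : Type} (f : σ → Int × Int → σ) (edges : List (List Int)) (init : σ) :
    edges.foldl (fun s e => match e with | [a, b] => f s (a, b) | _ => s) init
      = (pvPairs edges).foldl f init := by
  induction edges generalizing init with
  | nil => rfl
  | cons e t ih =>
      rcases e with _ | ⟨a, _ | ⟨b, _ | ⟨c, u⟩⟩⟩ <;> simp [pvPairs, List.foldl_cons, ih]

-- proof-side names for the fold steps of the two ports
def pfArrStep (arr : PySem.Dict Int (List Int)) (p : Int × Int) : PySem.Dict Int (List Int) :=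
  let arr := arr.insert p.1 (arr.getD p.1 [] ++ [p.2])
  arr.insert p.2 (arr.getD p.2 [] ++ [p.1])

def pfArr0 (nodes : List Int) : PySem.Dict Int (List Int) :=
  nodes.foldl (fun arr node => if arr.contains node then arr else arr.insert node []) PySem.Dict.empty

def pfDegStep (s : PySem.Dict Int Int × PySem.Set Int × List Int) (p : Int × Int) :
    PySem.Dict Int Int × PySem.Set Int × List Int :=
  let deg := s.1.insert p.1 (s.1.getD p.1 0 + 1)
  let deg := deg.insert p.2 (deg.getD p.2 0 + 1)
  let t := if s.2.1.contains p.1 then s.2 else (PySem.Set.add s.2.1 p.1, s.2.2 ++ [p.1])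
  let t := if t.1.contains p.2 then t else (PySem.Set.add t.1 p.2, t.2 ++ [p.2])
  (deg, t)

def pfSeen0 (nodes : List Int) : PySem.Set Int × List Int :=
  nodes.foldl (fun s node =>
    if s.1.contains node then s else (PySem.Set.add s.1 node, s.2 ++ [node])) (PySem.Set.empty, [])

theorem pvArr_eq (nodes : List Int) (edges : List (List Int)) :
    pvArr nodes edges = (pvPairs edges).foldl pfArrStep (pfArr0 nodes) := by
  unfold pvArr pfArr0
  exact pvFoldl_pairs pfArrStep edges _

theorem pvDegOrder_eq (nodes : List Int) (edges : List (List Int)) :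
    pvDegOrder nodes edges
      = (pvPairs edges).foldl pfDegStep (PySem.Dict.empty, (pfSeen0 nodes).1, (pfSeen0 nodes).2) := by
  unfold pvDegOrder pfSeen0
  exact pvFoldl_pairs pfDegStep edges _

theorem pvSatStep_eq (edges : List (List Int)) (comp : PySem.Set Int) :
    pvSatStep edges comp = (pvPairs edges).foldl
      (fun new p =>
        if comp.contains p.1 || comp.contains p.2 then PySem.Set.add (PySem.Set.add new p.1) p.2 else new)
      comp := by
  unfold pvSatStep
  exact pvFoldl_pairs
    (fun new p =>
      if comp.contains p.1 || comp.contains p.2 then PySem.Set.add (PySem.Set.add new p.1) p.2 else new)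
    edges comp

-- ---------- the initial node loops of the two ports ----------
theorem pfSeed (nodes : List Int) (arr : PySem.Dict Int (List Int)) (ord : List Int)
    (hk : arr.keys = ord) (hnd : ord.Nodup) (hv : ∀ x, arr.getD x [] = []) :
    (nodes.foldl (fun arr node => if arr.contains node then arr else arr.insert node []) arr).keys
      = (nodes.foldl (fun s node =>
          if s.1.contains node then s else (PySem.Set.add s.1 node, s.2 ++ [node]))
          ((ord : PySem.Set Int), ord)).2 ∧
    (nodes.foldl (fun s node =>
        if s.1.contains node then s else (PySem.Set.add s.1 node, s.2 ++ [node]))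
        ((ord : PySem.Set Int), ord)).1
      = (nodes.foldl (fun s node =>
          if s.1.contains node then s else (PySem.Set.add s.1 node, s.2 ++ [node]))
          ((ord : PySem.Set Int), ord)).2 ∧
    (nodes.foldl (fun s node =>
        if s.1.contains node then s else (PySem.Set.add s.1 node, s.2 ++ [node]))
        ((ord : PySem.Set Int), ord)).2.Nodup ∧
    (∀ x, (nodes.foldl (fun arr node => if arr.contains node then arr else arr.insert node []) arr).getD x [] = []) ∧
    (∀ m, m ∈ (nodes.foldl (fun s node =>
        if s.1.contains node then s else (PySem.Set.add s.1 node, s.2 ++ [node]))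
        ((ord : PySem.Set Int), ord)).2 ↔ m ∈ ord ∨ m ∈ nodes) := by
  induction nodes generalizing arr ord with
  | nil => simpa using ⟨hk, hnd, hv⟩
  | cons n t ih =>
      by_cases h : n ∈ ord
      · have hca : arr.contains n = true := by
          rw [PySem.Dict.contains_eq_decide_mem_keys, hk]; simpa using h
        have hcs : List.contains ord n = true := by simpa using h
        have := ih arr ord hk hnd hv
        simp only [List.foldl_cons, hca, hcs, if_pos]
        refine ⟨this.1, this.2.1, this.2.2.1, this.2.2.2.1, fun m => ?_⟩
        rw [this.2.2.2.2 m]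
        constructor
        · rintro (hm | hm)
          · exact Or.inl hm
          · exact Or.inr (List.mem_cons_of_mem _ hm)
        · rintro (hm | hm)
          · exact Or.inl hm
          · rcases List.mem_cons.mp hm with rfl | hm
            · exact Or.inl h
            · exact Or.inr hm
      · have hca : arr.contains n = false := by
          rw [PySem.Dict.contains_eq_decide_mem_keys, hk]; simpa using h
        have hcs : List.contains ord n = false := by simpa using h
        have hk' : (arr.insert n []).keys = ord ++ [n] := by
          rw [PySem.Dict.keys_insert_of_not_contains _ _ hca, hk]
        have hadd : PySem.Set.add (ord : PySem.Set Int) n = ((ord ++ [n] : List Int) : PySem.Set Int) :=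
          PySem.Set.add_of_not_mem h
        have hnd' : (ord ++ [n]).Nodup := by
          rw [List.nodup_append]
          refine ⟨hnd, List.nodup_singleton n, ?_⟩
          intro a ha b hb hab
          exact h ((hab.trans (List.mem_singleton.mp hb)) ▸ ha)
        have hv' : ∀ x, (arr.insert n []).getD x [] = [] := by
          intro x
          rw [PySem.Dict.getD_insert]
          split <;> simp [hv]
        have := ih (arr.insert n []) (ord ++ [n]) hk' hnd' hv'
        simp only [List.foldl_cons, hca, hcs, Bool.false_eq_true, if_false, hadd]
        refine ⟨this.1, this.2.1, this.2.2.1, this.2.2.2.1, fun m => ?_⟩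
        rw [this.2.2.2.2 m]
        constructor
        · rintro (hm | hm)
          · rcases List.mem_append.mp hm with hm | hm
            · exact Or.inl hm
            · simp at hm; subst hm; exact Or.inr (List.mem_cons_self)
          · exact Or.inr (List.mem_cons_of_mem _ hm)
        · rintro (hm | hm)
          · exact Or.inl (List.mem_append.mpr (Or.inl hm))
          · rcases List.mem_cons.mp hm with rfl | hm
            · exact Or.inl (by simp)
            · exact Or.inr hm

theorem pfSeed0 (nodes : List Int) :
    (pfArr0 nodes).keys = (pfSeen0 nodes).2 ∧ (pfSeen0 nodes).1 = (pfSeen0 nodes).2 ∧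
    (pfSeen0 nodes).2.Nodup ∧ (∀ x, (pfArr0 nodes).getD x [] = []) ∧
    (∀ m, m ∈ (pfSeen0 nodes).2 ↔ m ∈ nodes) := by
  have e : ((([] : List Int) : PySem.Set Int), ([] : List Int))
      = ((PySem.Set.empty : PySem.Set Int), ([] : List Int)) := rfl
  have := pfSeed nodes PySem.Dict.empty [] (by simp [PySem.Dict.keys_empty]) (by simp)
    (by intro x; simp [PySem.Dict.getD_empty])
  rw [e] at this
  unfold pfArr0 pfSeen0
  refine ⟨this.1, this.2.1, this.2.2.1, this.2.2.2.1, fun m => ?_⟩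
  have h5 := this.2.2.2.2 m
  simp only [List.not_mem_nil, false_or] at h5
  exact h5

theorem pfArr0_getD (nodes : List Int) (x : Int) : (pfArr0 nodes).getD x [] = [] := by
  exact (pfSeed0 nodes).2.2.2.1 x

theorem pfSeen0_fst (nodes : List Int) : (pfSeen0 nodes).1 = (pfSeen0 nodes).2 := by
  exact (pfSeed0 nodes).2.1

theorem pfArr0_keys (nodes : List Int) : (pfArr0 nodes).keys = (pfSeen0 nodes).2 := by
  exact (pfSeed0 nodes).1

theorem pfSeen0_nodup (nodes : List Int) : (pfSeen0 nodes).2.Nodup := by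
  exact (pfSeed0 nodes).2.2.1


theorem pvAdjP_cons (a b x y : Int) (t : List (Int × Int)) :
    pvAdjP ((a, b) :: t) x y ↔ ((x = a ∧ y = b) ∨ (x = b ∧ y = a)) ∨ pvAdjP t x y := by
  simp only [pvAdjP, List.mem_cons]
  constructor
  · rintro ⟨p, hp | hp, h⟩
    · subst hp; left
      rcases h with h | h
      · rw [Prod.ext_iff] at h
        exact Or.inl ⟨h.1.symm, h.2.symm⟩
      · rw [Prod.ext_iff] at h
        exact Or.inr ⟨h.2.symm, h.1.symm⟩
    · exact Or.inr ⟨p, hp, h⟩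
  · rintro (h | ⟨p, hp, h⟩)
    · refine ⟨(a, b), Or.inl rfl, ?_⟩
      rcases h with ⟨rfl, rfl⟩ | ⟨rfl, rfl⟩ <;> simp
    · exact ⟨p, Or.inr hp, h⟩

theorem pfOrShuffle (P A B E : Prop) : (((P ∨ A) ∨ B) ∨ E) ↔ (P ∨ ((A ∨ B) ∨ E)) := by tauto

-- one "touch" of endpoint a (with recorded neighbour v): what each port's state becomes
theorem pfTouch (arr : PySem.Dict Int (List Int)) (deg : PySem.Dict Int Int)
    (ord : List Int) (a v : Int)
    (hk : arr.keys = ord) (hnd : ord.Nodup)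
    (hd : ∀ x, ((arr.getD x []).length : Int) = deg.getD x 0) :
    (arr.insert a (arr.getD a [] ++ [v])).keys = (if a ∈ ord then ord else ord ++ [a]) ∧
    (if a ∈ ord then ord else ord ++ [a]).Nodup ∧
    (∀ x, (((arr.insert a (arr.getD a [] ++ [v])).getD x []).length : Int)
        = (deg.insert a (deg.getD a 0 + 1)).getD x 0) ∧
    (∀ x y, y ∈ (arr.insert a (arr.getD a [] ++ [v])).getD x []
        ↔ y ∈ arr.getD x [] ∨ (x = a ∧ y = v)) ∧
    (∀ m, m ∈ (if a ∈ ord then ord else ord ++ [a]) ↔ m ∈ ord ∨ m = a) ∧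
    ((if PySem.Set.contains ((ord : List Int) : PySem.Set Int) a = true
          then (((ord : List Int) : PySem.Set Int), ord)
        else (PySem.Set.add ((ord : List Int) : PySem.Set Int) a, ord ++ [a]))
      = (((if a ∈ ord then ord else ord ++ [a] : List Int) : PySem.Set Int),
          (if a ∈ ord then ord else ord ++ [a]))) := by
  have hlen : ∀ x, (((arr.insert a (arr.getD a [] ++ [v])).getD x []).length : Int)
      = (deg.insert a (deg.getD a 0 + 1)).getD x 0 := by
    intro x
    rw [PySem.Dict.getD_insert, PySem.Dict.getD_insert]
    split
    · rename_i hx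
      simp only [List.length_append, List.length_cons, List.length_nil]
      push_cast
      rw [hd a]
    · exact hd x
  have hnbr : ∀ x y, y ∈ (arr.insert a (arr.getD a [] ++ [v])).getD x []
      ↔ y ∈ arr.getD x [] ∨ (x = a ∧ y = v) := by
    intro x y
    rw [PySem.Dict.getD_insert]
    split
    · rename_i hx; subst hx; simp
    · rename_i hx; simp [hx]
  by_cases ha : a ∈ ord
  · have hca : arr.contains a = true := by
      rw [PySem.Dict.contains_eq_decide_mem_keys, hk]; simpa using ha
    have hcl : PySem.Set.contains ((ord : List Int) : PySem.Set Int) a = true := by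
      simpa [PySem.Set.contains_iff] using ha
    refine ⟨?_, ?_, hlen, hnbr, ?_, ?_⟩
    · rw [if_pos ha, PySem.Dict.keys_insert_of_contains _ _ hca, hk]
    · rw [if_pos ha]; exact hnd
    · intro m; rw [if_pos ha]
      exact ⟨fun h => Or.inl h, fun h => h.elim id (fun h => h ▸ ha)⟩
    · rw [hcl, if_pos ha]; simp
  · have hca : arr.contains a = false := by
      rw [PySem.Dict.contains_eq_decide_mem_keys, hk]; simpa using ha
    have hcl : PySem.Set.contains ((ord : List Int) : PySem.Set Int) a = false := by
      simp only [PySem.Set.contains_eq_listContains]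
      simpa using ha
    refine ⟨?_, ?_, hlen, hnbr, ?_, ?_⟩
    · rw [if_neg ha, PySem.Dict.keys_insert_of_not_contains _ _ hca, hk]
    · rw [if_neg ha]
      rw [List.nodup_append]
      refine ⟨hnd, List.nodup_singleton a, ?_⟩
      intro m hm c hc hmc
      exact ha ((hmc.trans (List.mem_singleton.mp hc)) ▸ hm)
    · intro m; rw [if_neg ha]; simp
    · rw [hcl, if_neg ha]
      simp only [Bool.false_eq_true, if_false, Prod.mk.injEq]
      exact ⟨PySem.Set.add_of_not_mem ha, trivial⟩

-- ---------- parallel characterization of the two edge-building folds ----------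
theorem pvBuild_char (ps : List (Int × Int)) (arr : PySem.Dict Int (List Int))
    (deg : PySem.Dict Int Int) (ord : List Int)
    (hk : arr.keys = ord) (hnd : ord.Nodup)
    (hd : ∀ x, ((arr.getD x []).length : Int) = deg.getD x 0) :
    (ps.foldl pfArrStep arr).keys = (ps.foldl pfDegStep (deg, (ord : PySem.Set Int), ord)).2.2 ∧
    (ps.foldl pfDegStep (deg, (ord : PySem.Set Int), ord)).2.1
      = (ps.foldl pfDegStep (deg, (ord : PySem.Set Int), ord)).2.2 ∧
    (ps.foldl pfDegStep (deg, (ord : PySem.Set Int), ord)).2.2.Nodup ∧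
    (∀ x, (((ps.foldl pfArrStep arr).getD x []).length : Int)
      = (ps.foldl pfDegStep (deg, (ord : PySem.Set Int), ord)).1.getD x 0) ∧
    (∀ x y, y ∈ (ps.foldl pfArrStep arr).getD x [] ↔ y ∈ arr.getD x [] ∨ pvAdjP ps x y) ∧
    (∀ m, m ∈ (ps.foldl pfDegStep (deg, (ord : PySem.Set Int), ord)).2.2
      ↔ m ∈ ord ∨ ∃ p ∈ ps, m = p.1 ∨ m = p.2) := by
  induction ps generalizing arr deg ord with
  | nil =>
      refine ⟨hk, rfl, hnd, hd, ?_, ?_⟩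
      · intro x y; simp [pvAdjP]
      · intro m; simp
  | cons p t ih =>
      obtain ⟨a, b⟩ := p
      obtain ⟨hk1, hnd1, hd1, hnbr1, hmem1, hset1⟩ := pfTouch arr deg ord a b hk hnd hd
      obtain ⟨hk2, hnd2, hd2, hnbr2, hmem2, hset2⟩ :=
        pfTouch (arr.insert a (arr.getD a [] ++ [b])) (deg.insert a (deg.getD a 0 + 1))
          (if a ∈ ord then ord else ord ++ [a]) b a hk1 hnd1 hd1
      have hstepA : pfArrStep arr (a, b)
          = (arr.insert a (arr.getD a [] ++ [b])).insert b
              ((arr.insert a (arr.getD a [] ++ [b])).getD b [] ++ [a]) := rfl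
      have hstepB : pfDegStep (deg, (((ord : List Int) : PySem.Set Int), ord)) (a, b)
          = ((deg.insert a (deg.getD a 0 + 1)).insert b
                ((deg.insert a (deg.getD a 0 + 1)).getD b 0 + 1),
             (((if b ∈ (if a ∈ ord then ord else ord ++ [a])
                  then (if a ∈ ord then ord else ord ++ [a])
                  else (if a ∈ ord then ord else ord ++ [a]) ++ [b] : List Int) : PySem.Set Int),
              (if b ∈ (if a ∈ ord then ord else ord ++ [a])
                  then (if a ∈ ord then ord else ord ++ [a])
                  else (if a ∈ ord then ord else ord ++ [a]) ++ [b]))) := by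
        unfold pfDegStep
        dsimp only
        rw [hset1, hset2]
      rw [List.foldl_cons, List.foldl_cons, hstepA, hstepB]
      obtain ⟨ck, cseen, cnd, cd, cnbr, cmem⟩ := ih _ _ _ hk2 hnd2 hd2
      refine ⟨ck, cseen, cnd, cd, ?_, ?_⟩
      · intro x y
        rw [cnbr x y, hnbr2 x y, hnbr1 x y, pvAdjP_cons]
        exact pfOrShuffle _ _ _ _
      · intro m
        rw [cmem m, hmem2 m, hmem1 m]
        have hcons : (∃ p ∈ ((a, b) :: t : List (Int × Int)), m = p.1 ∨ m = p.2)
            ↔ ((m = a ∨ m = b) ∨ ∃ p ∈ t, m = p.1 ∨ m = p.2) := by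
          simp only [List.mem_cons]
          constructor
          · rintro ⟨p, rfl | hp, h⟩
            · exact Or.inl h
            · exact Or.inr ⟨p, hp, h⟩
          · rintro (h | ⟨p, hp, h⟩)
            · exact ⟨(a, b), Or.inl rfl, h⟩
            · exact ⟨p, Or.inr hp, h⟩
        rw [hcons]
        exact pfOrShuffle _ _ _ _

-- ---------- counting unmarked nodes (for the BFS fuel bound) ----------
theorem pfFilterSub (p : Int → Bool) :
    ∀ (univ W : List Int), univ.Nodup → W.Nodup → (∀ w ∈ W, w ∈ univ) → (∀ w ∈ W, p w = true) →
    (univ.filter (fun x => p x && !(W.contains x))).length + W.length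
      = (univ.filter p).length := by
  intro univ
  induction univ with
  | nil =>
      intro W hU hW hWu hWp
      have : W = [] := by
        cases W with
        | nil => rfl
        | cons w t => exact absurd (hWu w List.mem_cons_self) (List.not_mem_nil)
      subst this; simp
  | cons u t ih =>
      intro W hU hW hWu hWp
      have hU' : t.Nodup := (List.nodup_cons.mp hU).2
      have hu : u ∉ t := (List.nodup_cons.mp hU).1
      by_cases huW : u ∈ W
      · have hpu : p u = true := hWp u huW
        have hcu : W.contains u = true := by simpa using huW
        have hWe : (W.erase u).Nodup := hW.erase u
        have hWeu : ∀ w ∈ W.erase u, w ∈ t := by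
          intro w hw
          have hwW : w ∈ W := List.mem_of_mem_erase hw
          have hwu : w ≠ u := by
            intro h; subst h
            exact (List.Nodup.not_mem_erase hW) hw
          rcases List.mem_cons.mp (hWu w hwW) with h | h
          · exact absurd h hwu
          · exact h
        have hWep : ∀ w ∈ W.erase u, p w = true := fun w hw => hWp w (List.mem_of_mem_erase hw)
        have heq : t.filter (fun x => p x && !(W.contains x))
            = t.filter (fun x => p x && !((W.erase u).contains x)) := by
          apply List.filter_congr
          intro x hx
          have hxu : x ≠ u := fun h => hu (h ▸ hx)
          have hcc : (W.contains x) = ((W.erase u).contains x) := by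
            by_cases hxW : x ∈ W
            · have h2 : x ∈ W.erase u := (List.mem_erase_of_ne hxu).mpr hxW
              simp [hxW, h2]
            · have h2 : x ∉ W.erase u := fun hc => hxW (List.mem_of_mem_erase hc)
              simp [hxW, h2]
          rw [hcc]
        have hlen : W.length = (W.erase u).length + 1 := by
          rw [List.length_erase_of_mem huW]
          have : 0 < W.length := List.length_pos_of_mem huW
          omega
        have hrec := ih (W.erase u) hU' hWe hWeu hWep
        simp only [List.filter_cons, hpu, hcu, Bool.not_true, Bool.and_false, Bool.false_eq_true,
          if_false, if_true, List.length_cons, heq, hlen]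
        omega
      · have hcu : W.contains u = false := by simpa using huW
        have hWu' : ∀ w ∈ W, w ∈ t := by
          intro w hw
          rcases List.mem_cons.mp (hWu w hw) with h | h
          · exact absurd (h ▸ hw) huW
          · exact h
        have hrec := ih W hU' hW hWu' hWp
        by_cases hpu : p u = true
        · simp only [List.filter_cons, hpu, hcu, Bool.not_false, Bool.and_true, if_true,
            List.length_cons]
          omega
        · have hpu' : p u = false := by simpa using hpu
          simp only [List.filter_cons, hpu', Bool.false_and, Bool.false_eq_true, if_false]
          omega

-- ---------- the inner `for nxt in arr[now]:` loop ----------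
theorem pfInner (arr : PySem.Dict Int (List Int)) (C : List Int) (a0 a1 : Int)
    (ns : List Int) :
    ∀ (V : List Int) (check : PySem.Dict Int Bool) (cnt : Int × Int) (app : List Int),
    (∀ x, (check.getD x false = true) ↔ (x ∈ C ∨ x ∈ V)) →
    (∀ v ∈ V, v ∉ C) → V.Nodup →
    cnt = (a0 + ((V.filter (fun x => !pvParA arr x)).length : Int),
           a1 + ((V.filter (fun x => pvParA arr x)).length : Int)) →
    ∃ W : List Int,
      (ns.foldl (fun (s : PySem.Dict Int Bool × (Int × Int) × List Int) nxt =>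
          if s.1.getD nxt false then s
          else (s.1.insert nxt true, pvBump s.2.1 (pvParA arr nxt), s.2.2 ++ [nxt]))
        (check, cnt, app))
      = ((ns.foldl (fun (s : PySem.Dict Int Bool × (Int × Int) × List Int) nxt =>
          if s.1.getD nxt false then s
          else (s.1.insert nxt true, pvBump s.2.1 (pvParA arr nxt), s.2.2 ++ [nxt]))
        (check, cnt, app)).1,
          (a0 + (((V ++ W).filter (fun x => !pvParA arr x)).length : Int),
           a1 + (((V ++ W).filter (fun x => pvParA arr x)).length : Int)),
          app ++ W) ∧
      (∀ x, ((ns.foldl (fun (s : PySem.Dict Int Bool × (Int × Int) × List Int) nxt =>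
          if s.1.getD nxt false then s
          else (s.1.insert nxt true, pvBump s.2.1 (pvParA arr nxt), s.2.2 ++ [nxt]))
        (check, cnt, app)).1.getD x false = true) ↔ (x ∈ C ∨ x ∈ V ++ W)) ∧
      (V ++ W).Nodup ∧
      (∀ w ∈ W, w ∈ ns ∧ w ∉ C ∧ w ∉ V) ∧
      (∀ y ∈ ns, y ∈ C ∨ y ∈ V ++ W) := by
  induction ns with
  | nil =>
      intro V check cnt app hchk hVC hVnd hcnt
      refine ⟨[], ?_, ?_, by simpa using hVnd, by simp, by simp⟩
      · simp [hcnt]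
      · simpa using hchk
  | cons n ns ih =>
      intro V check cnt app hchk hVC hVnd hcnt
      by_cases hn : check.getD n false = true
      · have hmem : n ∈ C ∨ n ∈ V := (hchk n).mp hn
        obtain ⟨W, h1, h2, h3, h4, h5⟩ := ih V check cnt app hchk hVC hVnd hcnt
        rw [List.foldl_cons, if_pos hn]
        refine ⟨W, h1, h2, h3, ?_, ?_⟩
        · intro w hw
          obtain ⟨h6, h7, h8⟩ := h4 w hw
          exact ⟨List.mem_cons_of_mem _ h6, h7, h8⟩
        intro y hy
        rcases List.mem_cons.mp hy with rfl | hy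
        · rcases hmem with h | h
          · exact Or.inl h
          · exact Or.inr (List.mem_append.mpr (Or.inl h))
        · exact h5 y hy
      · have hnC : n ∉ C := fun h => hn ((hchk n).mpr (Or.inl h))
        have hnV : n ∉ V := fun h => hn ((hchk n).mpr (Or.inr h))
        have hn' : check.getD n false = false := by
          cases h : check.getD n false
          · rfl
          · exact absurd h hn
        rw [List.foldl_cons, hn']
        simp only [Bool.false_eq_true, if_false]
        have hchk' : ∀ x, ((check.insert n true).getD x false = true) ↔ (x ∈ C ∨ x ∈ V ++ [n]) := by
          intro x
          rw [PySem.Dict.getD_insert]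
          split
          · rename_i hx; subst hx; simp
          · rename_i hx
            rw [hchk x]
            simp [hx]
        have hVC' : ∀ v ∈ V ++ [n], v ∉ C := by
          intro v hv
          rcases List.mem_append.mp hv with h | h
          · exact hVC v h
          · rw [List.mem_singleton.mp h]; exact hnC
        have hVnd' : (V ++ [n]).Nodup := by
          rw [List.nodup_append]
          refine ⟨hVnd, List.nodup_singleton n, ?_⟩
          intro m hm c hc hmc
          exact hnV ((hmc.trans (List.mem_singleton.mp hc)) ▸ hm)
        have hcnt' : pvBump cnt (pvParA arr n)
            = (a0 + (((V ++ [n]).filter (fun x => !pvParA arr x)).length : Int),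
               a1 + (((V ++ [n]).filter (fun x => pvParA arr x)).length : Int)) := by
          subst hcnt
          unfold pvBump
          cases h : pvParA arr n <;>
            simp [List.filter_append, h] <;> push_cast <;> ring
        obtain ⟨W, h1, h2, h3, h4, h5⟩ :=
          ih (V ++ [n]) (check.insert n true) (pvBump cnt (pvParA arr n)) (app ++ [n])
            hchk' hVC' hVnd' hcnt'
        rw [List.append_assoc] at h1 h2 h3
        refine ⟨n :: W, ?_, ?_, ?_, ?_, ?_⟩
        · simpa using h1
        · simpa using h2
        · simpa using h3
        · intro w hw
          rcases List.mem_cons.mp hw with rfl | hw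
          · exact ⟨List.mem_cons_self, hnC, hnV⟩
          · obtain ⟨h6, h7, h8⟩ := h4 w hw
            refine ⟨List.mem_cons_of_mem _ h6, h7, ?_⟩
            intro hc
            exact h8 (List.mem_append.mpr (Or.inl hc))
        · intro y hy
          rcases List.mem_cons.mp hy with rfl | hy
          · exact Or.inr (List.mem_append.mpr (Or.inr List.mem_cons_self))
          · rcases h5 y hy with h | h
            · exact Or.inl h
            · rcases List.mem_append.mp h with h | h
              · rcases List.mem_append.mp h with h | h
                · exact Or.inr (List.mem_append.mpr (Or.inl h))
                · exact Or.inr (List.mem_append.mpr (Or.inr (List.mem_cons.mpr (Or.inl (List.mem_singleton.mp h)))))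
              · exact Or.inr (List.mem_append.mpr (Or.inr (List.mem_cons_of_mem _ h)))

-- ---------- A's BFS loop: it marks exactly the nodes reachable from the queue ----------
theorem pfBfs (arr : PySem.Dict Int (List Int)) (C : List Int) (a0 a1 : Int)
    (hrange : ∀ x y, y ∈ arr.getD x [] → y ∈ arr.keys)
    (hknd : arr.keys.Nodup) :
    ∀ (fuel : Nat) (V q : List Int) (check : PySem.Dict Int Bool) (cnt : Int × Int),
    2 * (arr.keys.filter (fun x => !(decide (x ∈ C) || V.contains x))).length + q.length < fuel →
    (∀ x, (check.getD x false = true) ↔ (x ∈ C ∨ x ∈ V)) →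
    (∀ v ∈ V, v ∉ C) → V.Nodup → (∀ x ∈ q, x ∈ V) →
    (∀ v ∈ V, v ∉ q → ∀ w ∈ arr.getD v [], (w ∈ C ∨ w ∈ V)) →
    cnt = (a0 + ((V.filter (fun x => !pvParA arr x)).length : Int),
           a1 + ((V.filter (fun x => pvParA arr x)).length : Int)) →
    ∃ V' : List Int,
      (pvBfs arr fuel check cnt q).2
        = (a0 + ((V'.filter (fun x => !pvParA arr x)).length : Int),
           a1 + ((V'.filter (fun x => pvParA arr x)).length : Int)) ∧
      (∀ x, ((pvBfs arr fuel check cnt q).1.getD x false = true) ↔ (x ∈ C ∨ x ∈ V')) ∧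
      (∀ v ∈ V, v ∈ V') ∧ V'.Nodup ∧ (∀ v ∈ V', v ∉ C) ∧
      (∀ v ∈ V', ∃ u ∈ V, Relation.ReflTransGen (fun x y => y ∈ arr.getD x []) u v) ∧
      (∀ v ∈ V', ∀ w ∈ arr.getD v [], (w ∈ C ∨ w ∈ V')) := by
  intro fuel
  induction fuel using Nat.strong_induction_on with
  | _ fuel ih =>
    intro V q check cnt hful hchk hVC hVnd hq hdone hcnt
    match fuel, q with
    | 0, _ => omega
    | f + 1, [] =>
        refine ⟨V, by simpa [pvBfs] using hcnt, by simpa [pvBfs] using hchk,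
          fun v hv => hv, hVnd, hVC, ?_, ?_⟩
        · exact fun v hv => ⟨v, hv, Relation.ReflTransGen.refl⟩
        · intro v hv w hw
          exact hdone v hv (List.not_mem_nil) w hw
    | f + 1, now :: rest =>
        obtain ⟨W, h1, h2, h3, h4, h5⟩ :=
          pfInner arr C a0 a1 (arr.getD now []) V check cnt [] hchk hVC hVnd hcnt
        have hnowV : now ∈ V := hq now List.mem_cons_self
        -- measure decrease
        have hWsub : ∀ w ∈ W, w ∈ arr.keys := by
          intro w hw
          exact hrange now w (h4 w hw).1
        have hWnd : W.Nodup := (List.nodup_append.mp h3).2.1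
        have hWp : ∀ w ∈ W, (fun x => !(decide (x ∈ C) || V.contains x)) w = true := by
          intro w hw
          obtain ⟨_, h7, h8⟩ := h4 w hw
          simp [h7, h8]
        have hcount := pfFilterSub (fun x => !(decide (x ∈ C) || V.contains x))
          arr.keys W hknd hWnd hWsub hWp
        have hfilter : arr.keys.filter (fun x => !(decide (x ∈ C) || (V ++ W).contains x))
            = arr.keys.filter (fun x =>
                (fun x => !(decide (x ∈ C) || V.contains x)) x && !(W.contains x)) := by
          apply List.filter_congr
          intro x hx
          rw [List.contains_append]
          cases hc : decide (x ∈ C) <;> cases hv : V.contains x <;> cases hw : W.contains x <;>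
            simp only [hc, hv, hw] <;> rfl
        -- the one unfolding step of the loop
        have hstep : pvBfs arr (f + 1) check cnt (now :: rest)
            = pvBfs arr f
                ((arr.getD now []).foldl
                  (fun (s : PySem.Dict Int Bool × (Int × Int) × List Int) nxt =>
                    if s.1.getD nxt false then s
                    else (s.1.insert nxt true, pvBump s.2.1 (pvParA arr nxt), s.2.2 ++ [nxt]))
                  (check, cnt, [])).1
                ((arr.getD now []).foldl
                  (fun (s : PySem.Dict Int Bool × (Int × Int) × List Int) nxt =>
                    if s.1.getD nxt false then s
                    else (s.1.insert nxt true, pvBump s.2.1 (pvParA arr nxt), s.2.2 ++ [nxt]))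
                  (check, cnt, [])).2.1
                (rest ++ ((arr.getD now []).foldl
                  (fun (s : PySem.Dict Int Bool × (Int × Int) × List Int) nxt =>
                    if s.1.getD nxt false then s
                    else (s.1.insert nxt true, pvBump s.2.1 (pvParA arr nxt), s.2.2 ++ [nxt]))
                  (check, cnt, [])).2.2) := rfl
        rw [h1] at hstep
        simp only [List.nil_append] at hstep
        have hrec := ih f (by omega) (V ++ W) (rest ++ W) _ _
          (by
            rw [hfilter]
            have hlq : (rest ++ W).length = rest.length + W.length := List.length_append
            have hlq2 : (now :: rest).length = rest.length + 1 := rfl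
            omega)
          h2
          (by
            intro v hv
            rcases List.mem_append.mp hv with h | h
            · exact hVC v h
            · exact (h4 v h).2.1)
          h3
          (by
            intro x hx
            rcases List.mem_append.mp hx with h | h
            · exact List.mem_append.mpr (Or.inl (hq x (List.mem_cons_of_mem _ h)))
            · exact List.mem_append.mpr (Or.inr h))
          (by
            intro v hv hvq w hw
            rcases List.mem_append.mp hv with h | h
            · by_cases hvnow : v = now
              · subst hvnow
                exact h5 w hw
              · have hvq' : v ∉ (now :: rest) := by
                  intro hc
                  rcases List.mem_cons.mp hc with hc | hc
                  · exact hvnow hc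
                  · exact hvq (List.mem_append.mpr (Or.inl hc))
                rcases hdone v h hvq' w hw with hws | hws
                · exact Or.inl hws
                · exact Or.inr (List.mem_append.mpr (Or.inl hws))
            · exact absurd (List.mem_append.mpr (Or.inr h)) hvq)
          rfl
        obtain ⟨V', c1, c2, c3, c4, c5, c6, c7⟩ := hrec
        rw [hstep]
        refine ⟨V', c1, c2, ?_, c4, c5, ?_, c7⟩
        · exact fun v hv => c3 v (List.mem_append.mpr (Or.inl hv))
        · intro v hv
          obtain ⟨u, hu, hru⟩ := c6 v hv
          rcases List.mem_append.mp hu with h | h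
          · exact ⟨u, h, hru⟩
          · refine ⟨now, hnowV, ?_⟩
            exact Relation.ReflTransGen.trans (Relation.ReflTransGen.single ((h4 u h).1)) hru

-- ---------- B's edge-scan fixpoint ----------
theorem pfSatStep_mem (edges : List (List Int)) (comp : PySem.Set Int) (x : Int) :
    x ∈ pvSatStep edges comp
      ↔ x ∈ comp ∨ ∃ p ∈ pvPairs edges, (p.1 ∈ comp ∨ p.2 ∈ comp) ∧ (x = p.1 ∨ x = p.2) := by
  rw [pvSatStep_eq]
  have main : ∀ (ps : List (Int × Int)) (acc : PySem.Set Int),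
      x ∈ ps.foldl (fun new p =>
          if comp.contains p.1 || comp.contains p.2
            then PySem.Set.add (PySem.Set.add new p.1) p.2 else new) acc
        ↔ x ∈ acc ∨ ∃ p ∈ ps, (p.1 ∈ comp ∨ p.2 ∈ comp) ∧ (x = p.1 ∨ x = p.2) := by
    intro ps
    induction ps with
    | nil => intro acc; simp
    | cons p t ih =>
        intro acc
        rw [List.foldl_cons]
        by_cases hp : (p.1 ∈ comp ∨ p.2 ∈ comp)
        · have hc : (comp.contains p.1 || comp.contains p.2) = true := by
            rcases hp with h | h <;> simp [PySem.Set.contains_iff, h]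
          rw [if_pos hc, ih]
          rw [PySem.Set.mem_add, PySem.Set.mem_add]
          constructor
          · rintro (((h | h) | h) | ⟨q, hq, h⟩)
            · exact Or.inl h
            · exact Or.inr ⟨p, List.mem_cons_self, hp, Or.inl h⟩
            · exact Or.inr ⟨p, List.mem_cons_self, hp, Or.inr h⟩
            · exact Or.inr ⟨q, List.mem_cons_of_mem _ hq, h⟩
          · rintro (h | ⟨q, hq, h1, h2⟩)
            · exact Or.inl (Or.inl (Or.inl h))
            · rcases List.mem_cons.mp hq with rfl | hq
              · rcases h2 with h2 | h2
                · exact Or.inl (Or.inl (Or.inr h2))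
                · exact Or.inl (Or.inr h2)
              · exact Or.inr ⟨q, hq, h1, h2⟩
        · have hc : (comp.contains p.1 || comp.contains p.2) = false := by
            simp only [Bool.or_eq_false_iff]
            constructor <;>
              · simp only [PySem.Set.contains_eq_listContains]
                simp only [List.contains_eq_mem, decide_eq_false_iff_not]
                tauto
          rw [hc]
          simp only [Bool.false_eq_true, if_false]
          rw [ih]
          constructor
          · rintro (h | ⟨q, hq, h⟩)
            · exact Or.inl h
            · exact Or.inr ⟨q, List.mem_cons_of_mem _ hq, h⟩
          · rintro (h | ⟨q, hq, h1, h2⟩)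
            · exact Or.inl h
            · rcases List.mem_cons.mp hq with rfl | hq
              · exact absurd h1 hp
              · exact Or.inr ⟨q, hq, h1, h2⟩
  exact main (pvPairs edges) comp

theorem pfSatStep_nodup (edges : List (List Int)) (comp : PySem.Set Int) (h : comp.Nodup) :
    (pvSatStep edges comp).Nodup := by
  rw [pvSatStep_eq]
  have main : ∀ (ps : List (Int × Int)) (acc : PySem.Set Int), acc.Nodup →
      (ps.foldl (fun new p =>
          if comp.contains p.1 || comp.contains p.2
            then PySem.Set.add (PySem.Set.add new p.1) p.2 else new) acc).Nodup := by
    intro ps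
    induction ps with
    | nil => intro acc h; exact h
    | cons p t ih =>
        intro acc h
        rw [List.foldl_cons]
        split
        · exact ih _ (PySem.Set.nodup_add _ _ (PySem.Set.nodup_add _ _ h))
        · exact ih _ h
  exact main (pvPairs edges) comp h

theorem pfSat_main (edges : List (List Int)) (U : List Int) (rep : Int)
    (hends : ∀ p ∈ pvPairs edges, p.1 ∈ U ∧ p.2 ∈ U) :
    ∀ (fuel : Nat) (comp : PySem.Set Int), comp.Nodup → (∀ x ∈ comp, x ∈ U) →
    U.length + 1 ≤ fuel + comp.length →
    (∀ x ∈ comp, pvRP (pvPairs edges) rep x) → rep ∈ comp →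
    (pvSat edges fuel comp).Nodup ∧
      (∀ x, x ∈ pvSat edges fuel comp ↔ pvRP (pvPairs edges) rep x) := by
  intro fuel
  induction fuel with
  | zero =>
      intro comp hnd hsub hlen _ _
      have : comp.length ≤ U.length := (List.subperm_of_subset hnd hsub).length_le
      omega
  | succ f ih =>
      intro comp hnd hsub hlen hreach hrep
      rw [pvSat]
      by_cases heq : PySem.Set.equal (pvSatStep edges comp) comp = true
      · rw [if_pos heq]
        have hfix := (PySem.Set.equal_iff _ _).mp heq
        refine ⟨hnd, fun x => ⟨fun hx => hreach x hx, fun hx => ?_⟩⟩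
        · -- completeness: induction along the path
          induction hx with
          | refl => exact hrep
          | tail hab hbc ihp =>
              rename_i b c
              obtain ⟨p, hp, hpe⟩ := hbc
              have hb : b ∈ comp := ihp
              have htouch : p.1 ∈ comp ∨ p.2 ∈ comp := by
                rcases hpe with rfl | rfl
                · exact Or.inl hb
                · exact Or.inr hb
              have : c ∈ pvSatStep edges comp := by
                rw [pfSatStep_mem]
                refine Or.inr ⟨p, hp, htouch, ?_⟩
                rcases hpe with rfl | rfl
                · exact Or.inr rfl
                · exact Or.inl rfl
              exact (hfix c).mp this
      · rw [if_neg heq]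
        have hsubstep : ∀ x ∈ comp, x ∈ pvSatStep edges comp := by
          intro x hx
          rw [pfSatStep_mem]; exact Or.inl hx
        have hnd' : (pvSatStep edges comp).Nodup := pfSatStep_nodup edges comp hnd
        have hsub' : ∀ x ∈ pvSatStep edges comp, x ∈ U := by
          intro x hx
          rcases (pfSatStep_mem edges comp x).mp hx with h | ⟨p, hp, _, h2⟩
          · exact hsub x h
          · rcases h2 with rfl | rfl
            · exact (hends p hp).1
            · exact (hends p hp).2
        have hgrow : comp.length + 1 ≤ (pvSatStep edges comp).length := by
          have hne : ∃ x, x ∈ pvSatStep edges comp ∧ x ∉ comp := by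
            by_contra hc
            push_neg at hc
            apply heq
            rw [PySem.Set.equal_iff]
            intro x
            exact ⟨fun hx => hc x hx, hsubstep x⟩
          obtain ⟨x, hx1, hx2⟩ := hne
          have hnd2 : (comp ++ [x]).Nodup := by
            rw [List.nodup_append]
            refine ⟨hnd, List.nodup_singleton x, ?_⟩
            intro m hm c hc hmc
            exact hx2 ((hmc.trans (List.mem_singleton.mp hc)) ▸ hm)
          have hsub2 : comp ++ [x] ⊆ pvSatStep edges comp := by
            intro m hm
            rcases List.mem_append.mp hm with h | h
            · exact hsubstep m h
            · exact (List.mem_singleton.mp h) ▸ hx1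
          have := (List.subperm_of_subset hnd2 hsub2).length_le
          simpa using this
        have hreach' : ∀ x ∈ pvSatStep edges comp, pvRP (pvPairs edges) rep x := by
          intro x hx
          rcases (pfSatStep_mem edges comp x).mp hx with h | ⟨p, hp, h1, h2⟩
          · exact hreach x h
          · -- x is an endpoint of an edge touching comp
            rcases h1 with ht | ht
            · rcases h2 with rfl | rfl
              · exact hreach p.1 ht
              · exact Relation.ReflTransGen.tail (hreach p.1 ht) ⟨p, hp, Or.inl rfl⟩
            · rcases h2 with rfl | rfl
              · exact Relation.ReflTransGen.tail (hreach p.2 ht) ⟨p, hp, Or.inr rfl⟩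
              · exact hreach p.2 ht
        exact ih (pvSatStep edges comp) hnd' hsub' (by omega) hreach'
          (hsubstep rep hrep)

-- ---------- gluing the two component searches together ----------
theorem pfRT_iff {r s : Int → Int → Prop} (h : ∀ x y, r x y ↔ s x y) (a b : Int) :
    Relation.ReflTransGen r a b ↔ Relation.ReflTransGen s a b :=
  ⟨Relation.ReflTransGen.mono (fun x y => (h x y).mp),
   Relation.ReflTransGen.mono (fun x y => (h x y).mpr)⟩

theorem pfCountFold (deg : PySem.Dict Int Int) (l : List Int) :
    ∀ c : Int × Int,
      l.foldl (fun c x => pvBump c (pvParB deg x)) c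
        = (c.1 + ((l.filter (fun x => !pvParB deg x)).length : Int),
           c.2 + ((l.filter (fun x => pvParB deg x)).length : Int)) := by
  induction l with
  | nil => intro c; simp
  | cons x t ih =>
      intro c
      rw [List.foldl_cons, ih]
      cases h : pvParB deg x <;>
        simp [pvBump, h, List.filter_cons] <;> push_cast <;> ring

theorem pvStepA_skip (arr : PySem.Dict Int (List Int)) (check : PySem.Dict Int Bool)
    (ans : Int × Int) (node : Int) (h : check.getD node false = true) :
    pvStepA arr (check, ans) node = (check, ans) := by
  simp only [pvStepA, h, if_true]

theorem pvStepA_go (arr : PySem.Dict Int (List Int)) (check : PySem.Dict Int Bool)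
    (ans : Int × Int) (node : Int) (h : check.getD node false = false) :
    pvStepA arr (check, ans) node
      = ((pvBfs arr (2 * arr.keys.length + 2) (check.insert node true)
            (pvBump (0, 0) (pvParA arr node)) [node]).1,
         pvClassify ans
           (pvBfs arr (2 * arr.keys.length + 2) (check.insert node true)
            (pvBump (0, 0) (pvParA arr node)) [node]).2) := by
  simp only [pvStepA, h, Bool.false_eq_true, if_false]

theorem pvStepB_skip (edges : List (List Int)) (deg : PySem.Dict Int Int) (n : Nat)
    (done : PySem.Set Int) (ans : Int × Int) (rep : Int)
    (h : PySem.Set.contains done rep = true) :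
    pvStepB edges deg n (done, ans) rep = (done, ans) := by
  simp only [pvStepB, h, if_true]

theorem pvStepB_go (edges : List (List Int)) (deg : PySem.Dict Int Int) (n : Nat)
    (done : PySem.Set Int) (ans : Int × Int) (rep : Int)
    (h : PySem.Set.contains done rep = false) :
    pvStepB edges deg n (done, ans) rep
      = (PySem.Set.union done (pvSat edges (n + 1) (PySem.Set.add PySem.Set.empty rep)),
         pvClassify ans
           ((pvSat edges (n + 1) (PySem.Set.add PySem.Set.empty rep)).foldl
             (fun c x => pvBump c (pvParB deg x)) (0, 0))) := by
  simp only [pvStepB, h, Bool.false_eq_true, if_false]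

theorem pfOuter (edges : List (List Int)) (arr : PySem.Dict Int (List Int))
    (deg : PySem.Dict Int Int) (ord : List Int)
    (hknd : arr.keys.Nodup)
    (hnbr : ∀ x y, y ∈ arr.getD x [] ↔ pvAdjP (pvPairs edges) x y)
    (hrange : ∀ x y, y ∈ arr.getD x [] → y ∈ arr.keys)
    (hends : ∀ p ∈ pvPairs edges, p.1 ∈ ord ∧ p.2 ∈ ord)
    (hpar : ∀ x, pvParA arr x = pvParB deg x) :
    ∀ (reps : List Int), (∀ r ∈ reps, r ∈ ord) →
    ∀ (M : List Int) (check : PySem.Dict Int Bool) (done : PySem.Set Int) (ans : Int × Int),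
    (∀ x, check.getD x false = true ↔ x ∈ M) →
    (∀ x, x ∈ done ↔ x ∈ M) → done.Nodup →
    (∀ x ∈ M, ∀ y ∈ arr.getD x [], y ∈ M) →
    (reps.foldl (pvStepA arr) (check, ans)).2
      = (reps.foldl (pvStepB edges deg ord.length) (done, ans)).2 := by
  intro reps
  induction reps with
  | nil => intro _ M check done ans _ _ _ _; rfl
  | cons rep reps ih =>
      intro hreps M check done ans hchk hdone hdnd hMcl
      have hreps' : ∀ r ∈ reps, r ∈ ord := fun r hr => hreps r (List.mem_cons_of_mem _ hr)
      rw [List.foldl_cons, List.foldl_cons]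
      by_cases hrep : rep ∈ M
      · have hcA : check.getD rep false = true := (hchk rep).mpr hrep
        have hcB : PySem.Set.contains done rep = true := by
          rw [PySem.Set.contains_iff]
          exact (hdone rep).mpr hrep
        rw [pvStepA_skip arr check ans rep hcA, pvStepB_skip edges deg ord.length done ans rep hcB]
        exact ih hreps' M check done ans hchk hdone hdnd hMcl
      · have hcA : check.getD rep false = false := by
          cases h : check.getD rep false
          · rfl
          · exact absurd ((hchk rep).mp h) hrep
        have hcB : PySem.Set.contains done rep = false := by
          cases h : PySem.Set.contains done rep
          · rfl
          · exact absurd ((hdone rep).mp ((PySem.Set.contains_iff done rep).mp h)) hrep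
        rw [pvStepA_go arr check ans rep hcA, pvStepB_go edges deg ord.length done ans rep hcB]
        -- A side: run the BFS characterization with C := M, V := [rep]
        have hbfs := pfBfs arr M 0 0 hrange hknd (2 * arr.keys.length + 2) [rep] [rep]
          (check.insert rep true) (pvBump (0, 0) (pvParA arr rep))
          (by
            have hle := List.length_filter_le
              (fun x => !(decide (x ∈ M) || [rep].contains x)) arr.keys
            have h1 : ([rep] : List Int).length = 1 := rfl
            omega)
          (by
            intro x
            rw [PySem.Dict.getD_insert]
            split
            · rename_i hx; subst hx; simp
            · rename_i hx
              rw [hchk x]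
              simp [hx])
          (by
            intro v hv
            rw [List.mem_singleton.mp hv]; exact hrep)
          (List.nodup_singleton rep)
          (fun x hx => hx)
          (by
            intro v hv hvq
            exact absurd hv hvq)
          (by cases h : pvParA arr rep <;> simp [pvBump, h])
        obtain ⟨V', c1, c2, c3, c4, c5, c6, c7⟩ := hbfs
        -- B side: run the saturation characterization
        have hcomp0 : PySem.Set.add PySem.Set.empty rep = [rep] := rfl
        have hsat := pfSat_main edges ord rep hends (ord.length + 1) [rep]
          (List.nodup_singleton rep)
          (by intro x hx; rw [List.mem_singleton.mp hx]; exact hreps rep List.mem_cons_self)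
          (by simp)
          (by intro x hx; rw [List.mem_singleton.mp hx]; exact Relation.ReflTransGen.refl)
          List.mem_cons_self
        rw [hcomp0]
        obtain ⟨snd, smem⟩ := hsat
        -- the two component sets have the same members
        have hVmem : ∀ v, v ∈ V' ↔ pvRP (pvPairs edges) rep v := by
          intro v
          constructor
          · intro hv
            obtain ⟨u, hu, hru⟩ := c6 v hv
            rw [List.mem_singleton.mp hu] at hru
            exact (pfRT_iff hnbr rep v).mp hru
          · intro hv
            unfold pvRP at hv
            induction hv with
            | refl => exact c3 rep List.mem_cons_self
            | tail hab hbc ihp =>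
                rename_i b c
                have hb : b ∈ V' := ihp
                have hnbc : c ∈ arr.getD b [] := (hnbr b c).mpr hbc
                rcases c7 b hb c hnbc with h | h
                · exfalso
                  have hncb : b ∈ arr.getD c [] := (hnbr c b).mpr (pvAdjP_symm hbc)
                  exact (c5 b hb) (hMcl c h b hncb)
                · exact h
        have hSV : ∀ v, v ∈ pvSat edges (ord.length + 1) [rep] ↔ v ∈ V' := by
          intro v; rw [smem v, hVmem v]
        have hperm : V'.Perm (pvSat edges (ord.length + 1) [rep]) :=
          (List.perm_ext_iff_of_nodup c4 snd).mpr (fun a => (hSV a).symm)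
        -- the two counts coincide
        have hcnt : (pvBfs arr (2 * arr.keys.length + 2) (check.insert rep true)
              (pvBump (0, 0) (pvParA arr rep)) [rep]).2
            = (pvSat edges (ord.length + 1) [rep]).foldl
                (fun c x => pvBump c (pvParB deg x)) (0, 0) := by
          rw [c1, pfCountFold]
          have e1 : V'.filter (fun x => !pvParA arr x)
              = V'.filter (fun x => !pvParB deg x) :=
            List.filter_congr (fun x _ => by rw [hpar])
          have e2 : V'.filter (fun x => pvParA arr x)
              = V'.filter (fun x => pvParB deg x) :=
            List.filter_congr (fun x _ => by rw [hpar])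
          rw [e1, e2,
            (hperm.filter (fun x => !pvParB deg x)).length_eq,
            (hperm.filter (fun x => pvParB deg x)).length_eq]
        -- invariants for the remaining reps, with M' = M ++ V'
        have hchk' : ∀ x, ((pvBfs arr (2 * arr.keys.length + 2) (check.insert rep true)
              (pvBump (0, 0) (pvParA arr rep)) [rep]).1.getD x false = true) ↔ x ∈ M ++ V' := by
          intro x
          rw [c2 x, List.mem_append]
        have hdone' : ∀ x, x ∈ PySem.Set.union done (pvSat edges (ord.length + 1) [rep])
            ↔ x ∈ M ++ V' := by
          intro x
          rw [PySem.Set.mem_union, List.mem_append, hdone x, hSV x]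
        have hdnd' : (PySem.Set.union done (pvSat edges (ord.length + 1) [rep])).Nodup :=
          PySem.Set.nodup_union done _ hdnd
        have hMcl' : ∀ x ∈ M ++ V', ∀ y ∈ arr.getD x [], y ∈ M ++ V' := by
          intro x hx y hy
          rcases List.mem_append.mp hx with h | h
          · exact List.mem_append.mpr (Or.inl (hMcl x h y hy))
          · rcases c7 x h y hy with h2 | h2
            · exact List.mem_append.mpr (Or.inl h2)
            · exact List.mem_append.mpr (Or.inr h2)
        rw [hcnt]
        exact ih hreps' (M ++ V') _ _ _ hchk' hdone' hdnd' hMcl'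

-- ===== VERDICT (by name: the statement is the Claim_ definition above) =====
theorem solution_spec : Claim_equal_solution := by
  unfold Claim_equal_solution Spec_solution
  intro nodes edges _ _
  -- the parallel characterization of both ports' precomputations
  have hA := pvArr_eq nodes edges
  have hB := pvDegOrder_eq nodes edges
  rw [pfSeen0_fst] at hB
  have hb := pvBuild_char (pvPairs edges) (pfArr0 nodes) PySem.Dict.empty (pfSeen0 nodes).2
    (pfArr0_keys nodes) (pfSeen0_nodup nodes)
    (by intro x; rw [pfArr0_getD]; simp [PySem.Dict.getD_empty])
  rw [← hA] at hb
  rw [← hB] at hb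
  obtain ⟨G1, -, G3, G4, G5, G6⟩ := hb
  have G5' : ∀ x y, y ∈ (pvArr nodes edges).getD x [] ↔ pvAdjP (pvPairs edges) x y := by
    intro x y
    rw [G5 x y, pfArr0_getD]
    simp
  have hends : ∀ p ∈ pvPairs edges,
      p.1 ∈ (pvDegOrder nodes edges).2.2 ∧ p.2 ∈ (pvDegOrder nodes edges).2.2 := by
    intro p hp
    constructor
    · exact (G6 p.1).mpr (Or.inr ⟨p, hp, Or.inl rfl⟩)
    · exact (G6 p.2).mpr (Or.inr ⟨p, hp, Or.inr rfl⟩)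
  have hrange : ∀ x y, y ∈ (pvArr nodes edges).getD x [] → y ∈ (pvArr nodes edges).keys := by
    intro x y hy
    rw [G1]
    obtain ⟨p, hp, hpe⟩ := (G5' x y).mp hy
    rcases hpe with h | h
    · have : y = p.2 := by rw [h]
      exact this ▸ (hends p hp).2
    · have : y = p.1 := by rw [h]
      exact this ▸ (hends p hp).1
  have hpar : ∀ x, pvParA (pvArr nodes edges) x = pvParB (pvDegOrder nodes edges).1 x := by
    intro x
    unfold pvParA pvParB
    rw [G4 x]
  have hknd : (pvArr nodes edges).keys.Nodup := by rw [G1]; exact G3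
  have hmain := pfOuter edges (pvArr nodes edges) (pvDegOrder nodes edges).1
    (pvDegOrder nodes edges).2.2 hknd G5' hrange hends hpar
    (pvDegOrder nodes edges).2.2 (fun r hr => hr)
    [] PySem.Dict.empty PySem.Set.empty (0, 0)
    (by intro x; simp [PySem.Dict.getD_empty])
    (by intro x; rfl)
    List.nodup_nil
    (by intro x hx; exact absurd hx (List.not_mem_nil))
  show [(List.foldl (pvStepA (pvArr nodes edges)) (PySem.Dict.empty, (0, 0))
            (pvArr nodes edges).keys).2.1,
         (List.foldl (pvStepA (pvArr nodes edges)) (PySem.Dict.empty, (0, 0))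
            (pvArr nodes edges).keys).2.2]
      = [(List.foldl (pvStepB edges (pvDegOrder nodes edges).1
              (pvDegOrder nodes edges).2.2.length) (PySem.Set.empty, (0, 0))
            (pvDegOrder nodes edges).2.2).2.1,
         (List.foldl (pvStepB edges (pvDegOrder nodes edges).1
              (pvDegOrder nodes edges).2.2.length) (PySem.Set.empty, (0, 0))
            (pvDegOrder nodes edges).2.2).2.2]
  rw [G1, hmain]
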